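-- pv_equiv track=rewrite | github.com/GitAlexandr/PP23 | generate_qa_data_for_rasa.py | clean_qa
-- ===== SOURCE A (Python) =====
-- def clean_qa(question_or_answer_text: str):
--     text = question_or_answer_text.strip() #
--     clean_map = {
--                 "\n": "",
--                 '"': "'",
--                 }
--     for char in clean_map:
--         text = text.replace(char, clean_map[char])
--
--     return text
-- ===== SOURCE B (Python) =====
-- def clean_qa(question_or_answer_text: str):
--     # Single pass over the stripped text instead of two full replace() scans.
--     return ''.join(
--         '' if c == '\n' else "'" if c == '"' else c
--         for c in question_or_answer_text.strip()
--     )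
-- ===== Notes on version B (the rewrite author's own statement) =====
-- stated objective: idiomatic
-- what changed: Replaced the dict-driven loop of two full-string .replace() scans with a single character-level pass that drops newlines and rewrites double quotes while building the result once.
import Mathlib
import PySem

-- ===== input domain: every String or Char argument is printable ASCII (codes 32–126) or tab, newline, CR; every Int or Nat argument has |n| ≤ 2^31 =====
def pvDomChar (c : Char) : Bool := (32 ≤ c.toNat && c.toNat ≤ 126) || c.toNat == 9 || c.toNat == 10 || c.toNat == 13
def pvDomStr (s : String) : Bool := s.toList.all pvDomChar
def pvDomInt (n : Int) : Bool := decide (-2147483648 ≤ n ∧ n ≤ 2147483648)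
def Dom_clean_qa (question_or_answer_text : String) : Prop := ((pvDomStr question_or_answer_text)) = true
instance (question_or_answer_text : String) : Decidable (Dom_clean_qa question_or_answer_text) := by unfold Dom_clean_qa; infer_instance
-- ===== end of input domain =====

-- B replaces A's dict-driven loop of two full .replace() scans with one character pass (idiomatic, not claimed faster).


-- ===== PORT A =====
def clean_qa (question_or_answer_text : String) : String :=
  let text := PySem.Str.strip question_or_answer_text
  let clean_map : PySem.Dict String String :=
    (PySem.Dict.empty.insert "\n" "").insert "\"" "'"
  -- for char in clean_map: text = text.replace(char, clean_map[char])
  clean_map.keys.foldl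
    (fun text char => PySem.Str.replace text char (clean_map.getD char "")) text

-- ===== PORT B =====
def clean_qa_alt (question_or_answer_text : String) : String :=
  -- ''.join('' if c == '\n' else "'" if c == '"' else c for c in text.strip())
  String.ofList <|
    (PySem.Str.strip question_or_answer_text).toList.foldr
      (fun c acc => if c = '\n' then acc else if c = '"' then '\'' :: acc else c :: acc) []

-- ===== PRECONDITION & SPEC =====
def Spec_clean_qa (question_or_answer_text : String) (out : String) : Prop := out = clean_qa_alt question_or_answer_text
instance (question_or_answer_text : String) (out : String) : Decidable (Spec_clean_qa question_or_answer_text out) := by unfold Spec_clean_qa; infer_instance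

-- ===== CLAIM (what is proved, stated in full; the proofs are below) =====
def Claim_equal_clean_qa : Prop := ∀ (question_or_answer_text : String), Dom_clean_qa question_or_answer_text → Spec_clean_qa question_or_answer_text (clean_qa question_or_answer_text)

-- ===== LEMMAS AND PROOFS =====

-- replace.go with a single-char pattern, given enough fuel, is a flatMap over the characters
theorem replace_go_single (a : Char) (new : List Char) :
    ∀ (fuel : Nat) (l acc : List Char), l.length ≤ fuel →
      PySem.Chars.replace.go [a] new fuel l acc
        = acc.reverse ++ l.flatMap (fun c => if c = a then new else [c]) := by
  intro fuel
  induction fuel with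
  | zero =>
    intro l acc h
    have : l = [] := List.length_eq_zero_iff.mp (Nat.le_zero.mp h)
    subst this
    simp [PySem.Chars.replace.go]
  | succ n ih =>
    intro l acc h
    cases l with
    | nil => simp [PySem.Chars.replace.go]
    | cons c t =>
      simp only [PySem.Chars.replace.go]
      by_cases hc : c = a
      · subst hc
        have hpre : List.isPrefixOf [c] (c :: t) = true := by
          simp [List.isPrefixOf]
        rw [if_pos hpre]
        have := ih t (new.reverse ++ acc) (by simpa using Nat.le_of_succ_le_succ h)
        simp only [List.length_nil, List.drop_zero, List.length_cons, List.drop_succ_cons]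
        rw [this]
        simp [List.flatMap_cons]
      · have hpre : List.isPrefixOf [a] (c :: t) = false := by
          simp [List.isPrefixOf, BEq.beq]
          intro hh; exact hc hh.symm
        rw [if_neg (by simp [hpre])]
        rw [ih t (c :: acc) (by simpa using Nat.le_of_succ_le_succ h)]
        simp [List.flatMap_cons, hc]

theorem replace_single (a : Char) (new s : List Char) :
    PySem.Chars.replace s [a] new = s.flatMap (fun c => if c = a then new else [c]) := by
  rw [PySem.Chars.replace]
  simp only [List.isEmpty_cons, if_false, Bool.false_eq_true]
  rw [replace_go_single a new s.length s [] (le_refl _)]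
  simp

theorem clean_qa_spec : Claim_equal_clean_qa := by
  intro s _
  unfold Spec_clean_qa clean_qa clean_qa_alt
  simp only [PySem.Dict.keys]
  -- evaluate the literal dict's key list and lookups
  have hkeys : (((PySem.Dict.empty.insert "\n" "").insert "\"" "'") : PySem.Dict String String).items.map (·.1) = ["\n", "\""] := by decide
  rw [hkeys]
  have h1 : (((PySem.Dict.empty.insert "\n" "").insert "\"" "'") : PySem.Dict String String).getD "\n" "" = "" := by decide
  have h2 : (((PySem.Dict.empty.insert "\n" "").insert "\"" "'") : PySem.Dict String String).getD "\"" "" = "'" := by decide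
  simp only [List.foldl_cons, List.foldl_nil, h1, h2]
  rw [PySem.Str.replace, PySem.Str.replace]
  set t := (PySem.Str.strip s).toList with ht
  apply congrArg String.ofList
  show PySem.Chars.replace (String.toList (String.ofList (PySem.Chars.replace t "\n".toList "".toList))) "\"".toList "'".toList = _
  rw [String.toList_ofList]
  have e1 : ("\n" : String).toList = ['\n'] := rfl
  have e2 : ("" : String).toList = [] := rfl
  have e3 : ("\"" : String).toList = ['"'] := rfl
  have e4 : ("'" : String).toList = ['\''] := rfl
  rw [e1, e2, e3, e4, replace_single, replace_single]
  induction t with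
  | nil => rfl
  | cons c t ih =>
    by_cases h1 : c = '\n'
    · subst h1; simpa using ih
    · by_cases h2 : c = '"'
      · subst h2; simpa [h1] using ih
      · simp [List.flatMap_cons, h1, h2, ih]
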